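-- pv_equiv track=rewrite | github.com/erijjj/base_de_donnee | TP2/TP2_Ex4_Erij.py | isSchemaBCNF
-- ===== SOURCE A (Python) =====
-- def closure(F: "list of dependencies", K: "set") -> set:
--     """
--     Retourne la fermeture de K sous F (K+).
--     On part de K et on applique les DF de F jusqu'à stabilité.
--     """
--     result = set(K)
--     changed = True
--     while changed:
--         changed = False
--         for alpha, beta in F:
--             if alpha.issubset(result):
--                 before = len(result)
--                 result = result.union(beta)
--                 if len(result) > before:
--                     changed = True
--     return result
--
-- def isSuperKey(F: "list of dependencies", R: set, K: set) -> bool: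
--     """
--     K est une super-cle si K+ = R.
--     """
--     return closure(F, K) == R
--
-- def isBCNF(F: "list of dependencies", R: set) -> bool:
--     """
--     R est en bcnf si pour toute DF alpha -> beta non triviale,
--     alpha est une super-cle de R.
--     """
--     for alpha, beta in F:
--         alpha = set(alpha)
--         beta = set(beta)
--
--         if not alpha.issubset(R) or not beta.issubset(R):
--             continue
--
--         if beta.issubset(alpha):
--             continue
--         if not isSuperKey(F, R, alpha):
--             return False
--     return True
--
-- def isSchemaBCNF(F: "list of dependencies", T: "list of relations") -> bool:
--     """
--     Retourne True si toutes les relations de T sont en bcnf.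
--     """
--     for R in T:
--
--         F_proj = [[set(a) & R, set(b) & R]
--                   for a, b in F
--                   if set(a).issubset(R) and set(b).issubset(R)]
--         if not isBCNF(F_proj, R):
--             return False
--     return True
-- ===== SOURCE B (Python) =====
-- def _closure(fds, K):
--     # attribute closure by consuming dependencies: fire every applicable
--     # dependency at once, drop it for good, recurse on the rest
--     applicable = [b for a, b in fds if a <= K]
--     if not applicable:
--         return K
--     rest = [(a, b) for a, b in fds if not a <= K]
--     return _closure(rest, K.union(*applicable))
--
-- def isSchemaBCNF(F, T):
--     for R in T:
--         R = set(R)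
--         proj = [(set(a), set(b)) for a, b in F
--                 if set(a) <= R and set(b) <= R]
--         for alpha, beta in proj:
--             if not beta <= alpha and _closure(proj, alpha) != R:
--                 return False
--     return True
-- ===== Notes on version B (the rewrite author's own statement) =====
-- stated objective: alternative
-- what changed: B flattens A's three nested helpers (closure/isSuperKey/isBCNF) into one scan per relation and replaces A's repeated-full-pass fixpoint attribute closure ('while changed: retry every dependency') by a recursive closure that fires all applicable dependencies at once and discards them, recursing on the strictly smaller dependency list.
import Mathlib
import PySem

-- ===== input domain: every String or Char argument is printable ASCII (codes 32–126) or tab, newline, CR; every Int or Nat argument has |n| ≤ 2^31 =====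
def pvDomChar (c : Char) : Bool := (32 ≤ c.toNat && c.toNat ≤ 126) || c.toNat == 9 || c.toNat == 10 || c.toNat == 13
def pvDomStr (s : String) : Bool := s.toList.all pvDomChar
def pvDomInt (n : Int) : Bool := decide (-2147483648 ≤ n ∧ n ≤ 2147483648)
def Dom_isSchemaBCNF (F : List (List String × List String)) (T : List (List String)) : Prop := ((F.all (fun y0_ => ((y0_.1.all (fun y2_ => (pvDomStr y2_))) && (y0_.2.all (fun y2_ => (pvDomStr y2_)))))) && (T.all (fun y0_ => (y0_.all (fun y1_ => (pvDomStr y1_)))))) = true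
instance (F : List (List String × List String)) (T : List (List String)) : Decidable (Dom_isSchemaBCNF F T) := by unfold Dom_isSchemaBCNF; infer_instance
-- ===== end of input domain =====

-- B replaces A's three nested helpers and its repeated full-pass fixpoint closure
-- ('while changed: for every dependency …') by a flat per-relation scan with a recursive
-- attribute closure that fires every applicable dependency at once and then discards it,
-- recursing on the strictly smaller dependency list (alternative decomposition, same worst-case cost).

-- ===== PORT A =====
-- closure's inner 'for alpha, beta in F' pass, threading the (result, changed) state
def closureAStepGo (F : List (List String × List String))
    (st : PySem.Set String × Bool) : PySem.Set String × Bool :=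
  F.foldl (fun st p =>
    if PySem.Set.issubset p.1 st.1 then
      let before := PySem.Set.len st.1
      let r := PySem.Set.union st.1 p.2
      (r, if before < PySem.Set.len r then true else st.2)
    else st) st

def closureAStep (F : List (List String × List String)) (result : PySem.Set String) :
    PySem.Set String × Bool :=
  closureAStepGo F (result, false)

-- the 'while changed' loop; the fuel passed below strictly bounds the number of growing
-- passes, so on every input this computes exactly the Python fixpoint
def closureALoop (F : List (List String × List String)) :
    Nat → PySem.Set String → PySem.Set String
  | 0, result => result
  | fuel+1, result =>
    let st := closureAStep F result
    if st.2 then closureALoop F fuel st.1 else st.1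

def closureA (F : List (List String × List String)) (K : List String) : PySem.Set String :=
  closureALoop F (K.length + F.foldl (fun n p => n + p.2.length) 0 + 1) (PySem.Set.ofList K)

def isSuperKeyA (F : List (List String × List String)) (R : List String) (K : List String) : Bool :=
  PySem.Set.equal (closureA F K) (PySem.Set.ofList R)

def isBCNFAGo (F : List (List String × List String)) (R : List String) :
    List (List String × List String) → Bool
  | [] => true
  | p :: rest =>
    let alpha := PySem.Set.ofList p.1
    let beta := PySem.Set.ofList p.2
    if !(PySem.Set.issubset alpha R) || !(PySem.Set.issubset beta R) then isBCNFAGo F R rest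
    else if PySem.Set.issubset beta alpha then isBCNFAGo F R rest
    else if !(isSuperKeyA F R alpha) then false
    else isBCNFAGo F R rest

def isBCNFA (F : List (List String × List String)) (R : List String) : Bool :=
  isBCNFAGo F R F

-- 'for R in T: … return False / return True'
def isSchemaBCNFGo (F : List (List String × List String)) : List (List String) → Bool
  | [] => true
  | R :: rest =>
    let Fproj := (F.filter (fun p =>
        PySem.Set.issubset (PySem.Set.ofList p.1) R &&
        PySem.Set.issubset (PySem.Set.ofList p.2) R)).map (fun p =>
          (PySem.Set.inter (PySem.Set.ofList p.1) (PySem.Set.ofList R),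
           PySem.Set.inter (PySem.Set.ofList p.2) (PySem.Set.ofList R)))
    if !(isBCNFA Fproj R) then false else isSchemaBCNFGo F rest

def isSchemaBCNF (F : List (List String × List String)) (T : List (List String)) : Bool :=
  isSchemaBCNFGo F T

-- ===== PORT B =====
-- termination of _closure: when some dependency applies, the kept rest is strictly shorter
theorem pvFilterNotLt {α : Type} (l : List α) (p : α → Bool) (h : ¬ l.filter p = []) :
    (l.filter (fun x => !p x)).length < l.length := by
  induction l with
  | nil => exact absurd rfl h
  | cons a l ih =>
    by_cases ha : p a
    · have h1 : List.filter (fun x => !p x) (a :: l) = List.filter (fun x => !p x) l := by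
        simp [ha]
      rw [h1, List.length_cons]
      exact Nat.lt_succ_of_le (List.length_filter_le _ _)
    · have h2 : ¬ l.filter p = [] := by
        simpa [ha] using h
      have h1 : List.filter (fun x => !p x) (a :: l) = a :: List.filter (fun x => !p x) l := by
        simp [ha]
      rw [h1, List.length_cons, List.length_cons]
      exact Nat.succ_lt_succ (ih h2)


-- '_closure(fds, K)': fire all applicable dependencies, drop them, recurse on the rest
def closureBRec (fds : List (List String × List String)) (K : PySem.Set String) :
    PySem.Set String :=
  -- 'applicable' in Source B is the mapped-filter written out twice here (no let: it keeps
  -- the well-founded recursion's equations simple); same computation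
  if h : (fds.filter (fun p => PySem.Set.issubset p.1 K)).map Prod.snd = [] then K
  else
    closureBRec (fds.filter (fun p => !PySem.Set.issubset p.1 K))
      (((fds.filter (fun p => PySem.Set.issubset p.1 K)).map Prod.snd).foldl PySem.Set.union K)
termination_by fds.length
decreasing_by
  simp only [List.unattach_filter, List.unattach_attach]
  exact pvFilterNotLt fds (fun p => PySem.Set.issubset p.1 K) (fun hc => h (by rw [hc]; rfl))

-- 'for alpha, beta in proj: if not beta <= alpha and _closure(proj, alpha) != R: return False'
def altInner (proj : List (List String × List String)) (Rs : PySem.Set String) :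
    List (List String × List String) → Bool
  | [] => true
  | p :: rest =>
    if !(PySem.Set.issubset p.2 p.1) && !(PySem.Set.equal (closureBRec proj p.1) Rs) then false
    else altInner proj Rs rest

def isSchemaBCNFAltGo (F : List (List String × List String)) : List (List String) → Bool
  | [] => true
  | R :: rest =>
    let Rs := PySem.Set.ofList R
    let proj := (F.filter (fun p =>
        PySem.Set.issubset (PySem.Set.ofList p.1) Rs &&
        PySem.Set.issubset (PySem.Set.ofList p.2) Rs)).map (fun p =>
          (PySem.Set.ofList p.1, PySem.Set.ofList p.2))
    if altInner proj Rs proj then isSchemaBCNFAltGo F rest else false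

def isSchemaBCNF_alt (F : List (List String × List String)) (T : List (List String)) : Bool :=
  isSchemaBCNFAltGo F T

-- ===== PRECONDITION & SPEC =====
def Spec_isSchemaBCNF (F : List (List String × List String)) (T : List (List String)) (out : Bool) : Prop := out = isSchemaBCNF_alt F T
instance (F : List (List String × List String)) (T : List (List String)) (out : Bool) : Decidable (Spec_isSchemaBCNF F T out) := by unfold Spec_isSchemaBCNF; infer_instance

-- ===== CLAIM (what is proved, stated in full; the proofs are below) =====
def Claim_equal_isSchemaBCNF : Prop := ∀ (F : List (List String × List String)) (T : List (List String)), Dom_isSchemaBCNF F T → Spec_isSchemaBCNF F T (isSchemaBCNF F T)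

-- ===== LEMMAS AND PROOFS =====

-- the logical closure of K under fds: both programs' closures compute exactly this set
inductive Cl (fds : List (List String × List String)) (K : List String) : String → Prop where
  | base {x : String} : x ∈ K → Cl fds K x
  | step {p : List String × List String} {x : String} :
      p ∈ fds → (∀ y ∈ p.1, Cl fds K y) → x ∈ p.2 → Cl fds K x

-- --- basic Set facts ---
theorem union_exists_append (s : PySem.Set String) (t : List String) :
    ∃ e, PySem.Set.union s t = s ++ e :=
  ⟨_, PySem.Set.update_eq_append_filter s t⟩

theorem length_le_union (s : PySem.Set String) (t : List String) :
    s.length ≤ (PySem.Set.union s t).length := by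
  obtain ⟨e, he⟩ := union_exists_append s t
  simp [he]

theorem union_eq_of_length (s : PySem.Set String) (t : List String)
    (h : (PySem.Set.union s t).length ≤ s.length) : PySem.Set.union s t = s := by
  obtain ⟨e, he⟩ := union_exists_append s t
  rw [he] at h ⊢
  have : e = [] := by
    rw [List.length_append] at h
    exact List.eq_nil_of_length_eq_zero (by omega)
  simp [this]

theorem issubset_eq_of_mem_iff (s : PySem.Set String) (t t' : List String)
    (h : ∀ x, x ∈ t ↔ x ∈ t') : PySem.Set.issubset s t = PySem.Set.issubset s t' := by
  rw [Bool.eq_iff_iff, PySem.Set.issubset_iff, PySem.Set.issubset_iff]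
  exact ⟨fun hs x hx => (h x).mp (hs x hx), fun hs x hx => (h x).mpr (hs x hx)⟩

theorem inter_eq_self_of_issubset (a R : List String)
    (h : PySem.Set.issubset (PySem.Set.ofList a) (PySem.Set.ofList R) = true) :
    PySem.Set.inter (PySem.Set.ofList a) (PySem.Set.ofList R) = PySem.Set.ofList a := by
  have hsub := (PySem.Set.issubset_iff _ _).mp h
  unfold PySem.Set.inter
  apply List.filter_eq_self.mpr
  intro x hx
  have hx2 := hsub x hx
  simpa [PySem.Set.contains_eq_listContains, List.contains_iff_mem] using hx2

theorem equal_eq_of_mem_iff (s s' t : PySem.Set String)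
    (h : ∀ x, x ∈ s ↔ x ∈ s') : PySem.Set.equal s t = PySem.Set.equal s' t := by
  rw [Bool.eq_iff_iff, PySem.Set.equal_iff, PySem.Set.equal_iff]
  exact ⟨fun he x => ((h x).symm.trans (he x)), fun he x => ((h x).trans (he x))⟩

theorem len_lt_iff (s t : PySem.Set String) :
    (PySem.Set.len s < PySem.Set.len t) ↔ s.length < t.length := by
  simp [PySem.Set.len]

-- --- A-side: one pass of the fixpoint loop ---
theorem stepGo_cons (p : List String × List String) (F : List (List String × List String))
    (st : PySem.Set String × Bool) :
    closureAStepGo (p :: F) st = closureAStepGo F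
      (if PySem.Set.issubset p.1 st.1 then
        (PySem.Set.union st.1 p.2,
         if PySem.Set.len st.1 < PySem.Set.len (PySem.Set.union st.1 p.2) then true else st.2)
       else st) := by
  simp only [closureAStepGo, List.foldl_cons]

theorem stepGo_mono (F : List (List String × List String)) :
    ∀ (st : PySem.Set String × Bool), ∀ x ∈ st.1, x ∈ (closureAStepGo F st).1 := by
  induction F with
  | nil => intro st x hx; exact hx
  | cons p F ih =>
    intro st x hx
    rw [stepGo_cons]
    by_cases hs : PySem.Set.issubset p.1 st.1
    · simp only [hs, if_true]
      exact ih _ x (by simpa using (PySem.Set.mem_union st.1 p.2 x).mpr (Or.inl hx))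
    · simp only [hs]
      exact ih st x hx

theorem stepGo_universe (F : List (List String × List String)) :
    ∀ (st : PySem.Set String × Bool), ∀ x ∈ (closureAStepGo F st).1,
      x ∈ st.1 ∨ ∃ p ∈ F, x ∈ p.2 := by
  induction F with
  | nil => intro st x hx; exact Or.inl hx
  | cons p F ih =>
    intro st x hx
    rw [stepGo_cons] at hx
    by_cases hs : PySem.Set.issubset p.1 st.1
    · simp only [hs, if_true] at hx
      rcases ih _ x hx with h | ⟨q, hq, hxq⟩
      · rcases (PySem.Set.mem_union st.1 p.2 x).mp (by simpa using h) with h | h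
        · exact Or.inl h
        · exact Or.inr ⟨p, List.mem_cons_self, h⟩
      · exact Or.inr ⟨q, List.mem_cons_of_mem _ hq, hxq⟩
    · simp only [hs] at hx
      rcases ih st x hx with h | ⟨q, hq, hxq⟩
      · exact Or.inl h
      · exact Or.inr ⟨q, List.mem_cons_of_mem _ hq, hxq⟩

theorem stepGo_nodup (F : List (List String × List String)) :
    ∀ (st : PySem.Set String × Bool), st.1.Nodup → (closureAStepGo F st).1.Nodup := by
  induction F with
  | nil => intro st h; exact h
  | cons p F ih =>
    intro st h
    rw [stepGo_cons]
    by_cases hs : PySem.Set.issubset p.1 st.1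
    · simp only [hs, if_true]
      exact ih _ (PySem.Set.nodup_union st.1 p.2 h)
    · simp only [hs]; exact ih st h

theorem stepGo_sound (fds : List (List String × List String)) (K : List String) :
    ∀ (F : List (List String × List String)) (st : PySem.Set String × Bool),
    (∀ p ∈ F, p ∈ fds) → (∀ x ∈ st.1, Cl fds K x) →
    ∀ x ∈ (closureAStepGo F st).1, Cl fds K x := by
  intro F
  induction F with
  | nil => intro st _ hs x hx; exact hs x hx
  | cons p F ih =>
    intro st hF hs x hx
    rw [stepGo_cons] at hx
    by_cases hsub : PySem.Set.issubset p.1 st.1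
    · simp only [hsub, if_true] at hx
      refine ih _ (fun q hq => hF q (List.mem_cons_of_mem _ hq)) ?_ x hx
      intro y hy
      rcases (PySem.Set.mem_union st.1 p.2 y).mp (by simpa using hy) with h | h
      · exact hs y h
      · exact Cl.step (hF p List.mem_cons_self)
          (fun z hz => hs z ((PySem.Set.issubset_iff _ _).mp (by simpa using hsub) z hz)) h
    · simp only [hsub] at hx
      exact ih st (fun q hq => hF q (List.mem_cons_of_mem _ hq)) hs x hx

theorem stepGo_flag_mono (F : List (List String × List String)) :
    ∀ (r : PySem.Set String), (closureAStepGo F (r, true)).2 = true := by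
  induction F with
  | nil => intro r; rfl
  | cons p F ih =>
    intro r
    rw [stepGo_cons]
    by_cases hs : PySem.Set.issubset p.1 r
    · simp only [hs, if_true]
      by_cases hlt : PySem.Set.len r < PySem.Set.len (PySem.Set.union r p.2)
      · simp only [hlt, if_true]; exact ih _
      · simp only [hlt, if_false]; exact ih _
    · simp only [hs]; exact ih r

theorem stepGo_len_mono (F : List (List String × List String)) :
    ∀ (st : PySem.Set String × Bool), st.1.length ≤ (closureAStepGo F st).1.length := by
  induction F with
  | nil => intro st; exact Nat.le_refl _
  | cons p F ih =>
    intro st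
    rw [stepGo_cons]
    by_cases hs : PySem.Set.issubset p.1 st.1
    · simp only [hs, if_true]
      exact Nat.le_trans (length_le_union st.1 p.2)
        (ih (PySem.Set.union st.1 p.2,
          if PySem.Set.len st.1 < PySem.Set.len (PySem.Set.union st.1 p.2) then true
          else st.2))
    · simp only [hs]; exact ih st

theorem stepGo_fix (F : List (List String × List String)) :
    ∀ (st : PySem.Set String × Bool), (closureAStepGo F st).2 = false →
    (closureAStepGo F st).1 = st.1 ∧
      ∀ p ∈ F, (∀ y ∈ p.1, y ∈ st.1) → ∀ x ∈ p.2, x ∈ st.1 := by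
  induction F with
  | nil => intro st _; exact ⟨rfl, by simp⟩
  | cons p F ih =>
    intro st h
    rw [stepGo_cons] at h ⊢
    by_cases hsub : PySem.Set.issubset p.1 st.1
    · simp only [hsub, if_true] at h ⊢
      by_cases hlt : PySem.Set.len st.1 < PySem.Set.len (PySem.Set.union st.1 p.2)
      · exfalso
        simp only [hlt, if_true] at h
        rw [stepGo_flag_mono F _] at h
        simp at h
      · simp only [hlt, if_false] at h ⊢
        have hu : PySem.Set.union st.1 p.2 = st.1 := by
          apply union_eq_of_length
          rw [len_lt_iff] at hlt
          omega
        rw [hu] at h ⊢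
        obtain ⟨h1, h2⟩ := ih (st.1, st.2) h
        refine ⟨h1, ?_⟩
        intro q hq hq1 x hx
        rcases List.mem_cons.mp hq with rfl | hq
        · have : x ∈ PySem.Set.union st.1 q.2 := (PySem.Set.mem_union _ _ _).mpr (Or.inr hx)
          rwa [hu] at this
        · exact h2 q hq hq1 x hx
    · simp only [hsub] at h ⊢
      obtain ⟨h1, h2⟩ := ih st h
      refine ⟨h1, ?_⟩
      intro q hq hq1 x hx
      rcases List.mem_cons.mp hq with rfl | hq
      · exact absurd ((PySem.Set.issubset_iff _ _).mpr hq1) (by simpa using hsub)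
      · exact h2 q hq hq1 x hx

theorem stepGo_grow (F : List (List String × List String)) :
    ∀ (r : PySem.Set String), (closureAStepGo F (r, false)).2 = true →
    r.length < (closureAStepGo F (r, false)).1.length := by
  induction F with
  | nil => intro r h; exact absurd h (by simp [closureAStepGo])
  | cons p F ih =>
    intro r h
    rw [stepGo_cons] at h ⊢
    by_cases hsub : PySem.Set.issubset p.1 r
    · simp only [hsub, if_true] at h ⊢
      by_cases hlt : PySem.Set.len r < PySem.Set.len (PySem.Set.union r p.2)
      · simp only [hlt, if_true] at h ⊢
        rw [len_lt_iff] at hlt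
        exact Nat.lt_of_lt_of_le hlt (by
          simpa using stepGo_len_mono F ((PySem.Set.union r p.2, true)))
      · simp only [hlt, if_false] at h ⊢
        have hu : PySem.Set.union r p.2 = r := by
          apply union_eq_of_length
          rw [len_lt_iff] at hlt
          omega
        rw [hu] at h ⊢
        exact ih r h
    · simp only [hsub] at h ⊢
      exact ih r h

-- a Nodup list inside U is no longer than set(U)
theorem nodup_length_le (r : List String) (U : List String)
    (hn : r.Nodup) (hsub : ∀ x ∈ r, x ∈ U) : r.length ≤ (PySem.Set.ofList U).length := by
  have h1 : r.toFinset.card = r.length := List.toFinset_card_of_nodup hn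
  have h2 : (PySem.Set.ofList U).toFinset.card = (PySem.Set.ofList U).length :=
    List.toFinset_card_of_nodup (PySem.Set.nodup_ofList U)
  have h3 : r.toFinset ⊆ (PySem.Set.ofList U).toFinset := by
    intro x hx
    rw [List.mem_toFinset] at *
    exact (PySem.Set.mem_ofList _ _).mpr (hsub x (by simpa using hx))
  have := Finset.card_le_card h3
  omega

-- --- A-side: the loop reaches and returns the fixpoint within its fuel ---
theorem loopA_spec (fds : List (List String × List String)) (K : List String)
    (U : List String) (hU : ∀ p ∈ fds, ∀ x ∈ p.2, x ∈ U) :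
    ∀ fuel (r : PySem.Set String), r.Nodup → (∀ x ∈ r, x ∈ U) →
    (∀ x ∈ r, Cl fds K x) → (∀ x ∈ K, x ∈ r) →
    (PySem.Set.ofList U).length + 1 ≤ fuel + r.length →
    (∀ x ∈ r, x ∈ closureALoop fds fuel r) ∧
    (∀ x ∈ closureALoop fds fuel r, Cl fds K x) ∧
    (∀ x ∈ K, x ∈ closureALoop fds fuel r) ∧
    (∀ p ∈ fds, (∀ y ∈ p.1, y ∈ closureALoop fds fuel r) →
      ∀ x ∈ p.2, x ∈ closureALoop fds fuel r) := by
  intro fuel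
  induction fuel with
  | zero =>
    intro r hn hsub _ _ hfuel
    exact absurd (nodup_length_le r U hn hsub) (by omega)
  | succ fuel ih =>
    intro r hn hsub hsound hK hfuel
    show _ ∧ _
    rcases hflag : (closureAStep fds r).2 with _ | _
    · have heq : closureALoop fds (fuel+1) r = (closureAStep fds r).1 := by
        simp only [closureALoop, hflag]
        simp
      obtain ⟨h1, h2⟩ := stepGo_fix fds (r, false) hflag
      rw [heq]
      rw [show (closureAStep fds r).1 = r from h1]
      exact ⟨fun x hx => hx, hsound, hK, fun p hp => h2 p hp⟩
    · have heq : closureALoop fds (fuel+1) r = closureALoop fds fuel (closureAStep fds r).1 := by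
        simp only [closureALoop, hflag]
        simp
      rw [heq]
      have hgrow : r.length < (closureAStep fds r).1.length := stepGo_grow fds r hflag
      have hmono : ∀ x ∈ r, x ∈ (closureAStep fds r).1 := stepGo_mono fds (r, false)
      have huniv : ∀ x ∈ (closureAStep fds r).1, x ∈ U := by
        intro x hx
        rcases stepGo_universe fds (r, false) x hx with h | ⟨p, hp, hxp⟩
        · exact hsub x h
        · exact hU p hp x hxp
      obtain ⟨i1, i2, i3, i4⟩ := ih (closureAStep fds r).1
        (stepGo_nodup fds (r, false) hn) huniv
        (stepGo_sound fds K fds (r, false) (fun p hp => hp) hsound)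
        (fun x hx => hmono x (hK x hx))
        (by omega)
      exact ⟨fun x hx => i1 x (hmono x hx), i2, i3, i4⟩

theorem foldl_len (fds : List (List String × List String)) :
    ∀ n : Nat, fds.foldl (fun n p => n + p.2.length) n
      = n + ((fds.map Prod.snd).flatten).length := by
  induction fds with
  | nil => intro n; simp
  | cons p fds ih =>
    intro n
    simp only [List.foldl_cons, List.map_cons, List.flatten_cons, List.length_append]
    rw [ih]
    omega

theorem closureA_mem (fds : List (List String × List String)) (K : List String) (x : String) :
    x ∈ closureA fds K ↔ Cl fds K x := by
  have hU : ∀ p ∈ fds, ∀ y ∈ p.2, y ∈ K ++ (fds.map Prod.snd).flatten := by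
    intro p hp y hy
    refine List.mem_append_right _ (List.mem_flatten.mpr ⟨p.2, ?_, hy⟩)
    exact List.mem_map.mpr ⟨p, hp, rfl⟩
  have hfuel : (PySem.Set.ofList (K ++ (fds.map Prod.snd).flatten)).length + 1 ≤
      (K.length + fds.foldl (fun n p => n + p.2.length) 0 + 1) + (PySem.Set.ofList K).length := by
    have h1 := PySem.Set.length_ofList_le (K ++ (fds.map Prod.snd).flatten)
    rw [List.length_append] at h1
    have h2 := foldl_len fds 0
    omega
  obtain ⟨l1, l2, l3, l4⟩ := loopA_spec fds K (K ++ (fds.map Prod.snd).flatten) hU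
    (K.length + fds.foldl (fun n p => n + p.2.length) 0 + 1)
    (PySem.Set.ofList K)
    (PySem.Set.nodup_ofList K)
    (fun y hy => List.mem_append_left _ ((PySem.Set.mem_ofList _ _).mp hy))
    (fun y hy => Cl.base ((PySem.Set.mem_ofList _ _).mp hy))
    (fun y hy => (PySem.Set.mem_ofList _ _).mpr hy)
    hfuel
  constructor
  · intro hx; exact l2 x hx
  · intro hcl
    induction hcl with
    | base h => exact l3 _ h
    | step hp _ hx ih2 => exact l4 _ hp (fun y hy => ih2 y hy) _ hx

-- --- foldl-union facts for B's applicable right-hand sides ---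
theorem mem_foldl_union_left (bs : List (List String)) :
    ∀ (s : PySem.Set String) (x : String), x ∈ s → x ∈ bs.foldl PySem.Set.union s := by
  induction bs with
  | nil => intro s x hx; exact hx
  | cons b bs ih =>
    intro s x hx
    exact ih _ x ((PySem.Set.mem_union s b x).mpr (Or.inl hx))

theorem mem_foldl_union_right (bs : List (List String)) :
    ∀ (s : PySem.Set String) (b : List String), b ∈ bs → ∀ x ∈ b,
      x ∈ bs.foldl PySem.Set.union s := by
  induction bs with
  | nil => intro s b hb; exact absurd hb (by simp)
  | cons b' bs ih =>
    intro s b hb x hx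
    rcases List.mem_cons.mp hb with rfl | hb
    · exact mem_foldl_union_left bs _ x ((PySem.Set.mem_union s b x).mpr (Or.inr hx))
    · exact ih _ b hb x hx

theorem foldl_union_sound (P : String → Prop) (bs : List (List String)) :
    ∀ (s : PySem.Set String), (∀ x ∈ s, P x) → (∀ b ∈ bs, ∀ x ∈ b, P x) →
      ∀ x ∈ bs.foldl PySem.Set.union s, P x := by
  induction bs with
  | nil => intro s hs _ x hx; exact hs x hx
  | cons b bs ih =>
    intro s hs hb x hx
    refine ih _ ?_ (fun b' hb' => hb b' (List.mem_cons_of_mem _ hb')) x hx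
    intro y hy
    rcases (PySem.Set.mem_union s b y).mp hy with h | h
    · exact hs y h
    · exact hb b List.mem_cons_self y h

-- --- B-side: the consuming closure computes the same logical closure ---
theorem closureB_sub_aux : ∀ (n : Nat) (fds : List (List String × List String))
    (K : PySem.Set String), fds.length ≤ n → ∀ x ∈ K, x ∈ closureBRec fds K := by
  intro n
  induction n with
  | zero =>
    intro fds K hlen x hx
    have hnil : fds = [] := List.eq_nil_of_length_eq_zero (Nat.le_zero.mp hlen)
    subst hnil
    rw [closureBRec.eq_def, dif_pos (by simp)]
    exact hx
  | succ n ih =>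
    intro fds K hlen x hx
    by_cases hc : (fds.filter (fun p => PySem.Set.issubset p.1 K)).map Prod.snd = []
    · rw [closureBRec.eq_def, dif_pos hc]; exact hx
    · rw [closureBRec.eq_def, dif_neg hc]
      have hlt := pvFilterNotLt fds (fun p => PySem.Set.issubset p.1 K)
        (fun hcc => hc (by rw [hcc]; rfl))
      have hlt' : (fds.filter (fun p => !PySem.Set.issubset p.1 K)).length < fds.length := hlt
      exact ih _ _ (by omega) x (mem_foldl_union_left _ K x hx)

theorem closureB_sub (fds : List (List String × List String)) (K : PySem.Set String) :
    ∀ x ∈ K, x ∈ closureBRec fds K :=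
  closureB_sub_aux fds.length fds K (Nat.le_refl _)

theorem closureB_sound_aux (fds0 : List (List String × List String)) (K0 : List String) :
    ∀ (n : Nat) (fds : List (List String × List String)) (K : PySem.Set String),
    fds.length ≤ n →
    (∀ p ∈ fds, p ∈ fds0) → (∀ x ∈ K, Cl fds0 K0 x) →
    ∀ x ∈ closureBRec fds K, Cl fds0 K0 x := by
  intro n
  induction n with
  | zero =>
    intro fds K hlen hsub hK x hx
    have hnil : fds = [] := List.eq_nil_of_length_eq_zero (Nat.le_zero.mp hlen)
    subst hnil
    rw [closureBRec.eq_def, dif_pos (by simp)] at hx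
    exact hK x hx
  | succ n ih =>
    intro fds K hlen hsub hK x hx
    by_cases hc : (fds.filter (fun p => PySem.Set.issubset p.1 K)).map Prod.snd = []
    · rw [closureBRec.eq_def, dif_pos hc] at hx
      exact hK x hx
    · rw [closureBRec.eq_def, dif_neg hc] at hx
      have hlt := pvFilterNotLt fds (fun p => PySem.Set.issubset p.1 K)
        (fun hcc => hc (by rw [hcc]; rfl))
      have hlt' : (fds.filter (fun p => !PySem.Set.issubset p.1 K)).length < fds.length := hlt
      refine ih _ _ (by omega) ?_ ?_ x hx
      · intro p hp
        exact hsub p (List.mem_of_mem_filter hp)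
      · apply foldl_union_sound _ _ K hK
        intro b hb y hy
        obtain ⟨p, hp, rfl⟩ := List.mem_map.mp hb
        have hpf := List.mem_filter.mp hp
        exact Cl.step (hsub p hpf.1)
          (fun z hz => hK z ((PySem.Set.issubset_iff _ _).mp hpf.2 z hz)) hy

theorem closureB_sound (fds0 : List (List String × List String)) (K0 : List String)
    (fds : List (List String × List String)) (K : PySem.Set String)
    (hsub : ∀ p ∈ fds, p ∈ fds0) (hK : ∀ x ∈ K, Cl fds0 K0 x) :
    ∀ x ∈ closureBRec fds K, Cl fds0 K0 x :=
  closureB_sound_aux fds0 K0 fds.length fds K (Nat.le_refl _) hsub hK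

theorem closureB_closed_aux : ∀ (n : Nat) (fds : List (List String × List String))
    (K : PySem.Set String), fds.length ≤ n →
    ∀ p ∈ fds, (∀ y ∈ p.1, y ∈ closureBRec fds K) →
      ∀ x ∈ p.2, x ∈ closureBRec fds K := by
  intro n
  induction n with
  | zero =>
    intro fds K hlen p hp
    have hnil : fds = [] := List.eq_nil_of_length_eq_zero (Nat.le_zero.mp hlen)
    subst hnil
    exact absurd hp (by simp)
  | succ n ih =>
    intro fds K hlen p hp hp1 x hx
    by_cases hc : (fds.filter (fun p => PySem.Set.issubset p.1 K)).map Prod.snd = []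
    · exfalso
      rw [closureBRec.eq_def, dif_pos hc] at hp1
      have hall := List.filter_eq_nil_iff.mp (List.map_eq_nil_iff.mp hc)
      exact (hall p hp) ((PySem.Set.issubset_iff _ _).mpr hp1)
    · rw [closureBRec.eq_def, dif_neg hc] at hp1 ⊢
      have hlt := pvFilterNotLt fds (fun p => PySem.Set.issubset p.1 K)
        (fun hcc => hc (by rw [hcc]; rfl))
      have hlt' : (fds.filter (fun p => !PySem.Set.issubset p.1 K)).length < fds.length := hlt
      by_cases hsub : PySem.Set.issubset p.1 K
      · have hb : p.2 ∈ (fds.filter (fun p => PySem.Set.issubset p.1 K)).map Prod.snd :=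
          List.mem_map.mpr ⟨p, List.mem_filter.mpr ⟨hp, hsub⟩, rfl⟩
        exact closureB_sub _ _ x (mem_foldl_union_right _ K p.2 hb x hx)
      · refine ih _ _ (by omega) p ?_ hp1 x hx
        exact List.mem_filter.mpr ⟨hp, by rw [eq_false_of_ne_true hsub]; rfl⟩

theorem closureB_closed (fds : List (List String × List String)) (K : PySem.Set String) :
    ∀ p ∈ fds, (∀ y ∈ p.1, y ∈ closureBRec fds K) →
      ∀ x ∈ p.2, x ∈ closureBRec fds K :=
  closureB_closed_aux fds.length fds K (Nat.le_refl _)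

theorem closureB_mem (fds : List (List String × List String)) (K : PySem.Set String)
    (x : String) : x ∈ closureBRec fds K ↔ Cl fds K x := by
  constructor
  · exact fun hx => closureB_sound fds K fds K (fun p hp => hp) (fun y hy => Cl.base hy) x hx
  · intro hcl
    induction hcl with
    | base h => exact closureB_sub fds K _ h
    | step hp _ hx ih2 => exact closureB_closed fds K _ hp (fun y hy => ih2 y hy) _ hx

-- --- the two closures agree, hence the superkey tests agree ---
theorem superkey_eq (fds : List (List String × List String)) (K : List String)
    (t : PySem.Set String) :
    PySem.Set.equal (closureA fds K) t = PySem.Set.equal (closureBRec fds K) t := by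
  apply equal_eq_of_mem_iff
  intro x
  rw [closureA_mem, closureB_mem]

-- --- per-relation: the projected dependency lists are literally equal ---
theorem proj_eq (F : List (List String × List String)) (R : List String) :
    (F.filter (fun p =>
        PySem.Set.issubset (PySem.Set.ofList p.1) R &&
        PySem.Set.issubset (PySem.Set.ofList p.2) R)).map (fun p =>
          (PySem.Set.inter (PySem.Set.ofList p.1) (PySem.Set.ofList R),
           PySem.Set.inter (PySem.Set.ofList p.2) (PySem.Set.ofList R)))
      = (F.filter (fun p =>
        PySem.Set.issubset (PySem.Set.ofList p.1) (PySem.Set.ofList R) &&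
        PySem.Set.issubset (PySem.Set.ofList p.2) (PySem.Set.ofList R))).map (fun p =>
          (PySem.Set.ofList p.1, PySem.Set.ofList p.2)) := by
  have hmem : ∀ x : String, x ∈ R ↔ x ∈ PySem.Set.ofList R :=
    fun x => (PySem.Set.mem_ofList R x).symm
  rw [List.filter_congr (fun p _ => by
    rw [issubset_eq_of_mem_iff _ _ _ hmem, issubset_eq_of_mem_iff _ _ _ hmem] :
    ∀ p ∈ F, _)]
  apply List.map_congr_left
  intro p hp
  have hpf := (List.mem_filter.mp hp).2
  rw [Bool.and_eq_true] at hpf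
  rw [inter_eq_self_of_issubset _ _ hpf.1, inter_eq_self_of_issubset _ _ hpf.2]

theorem inner_eq (proj : List (List String × List String)) (R : List String)
    (hproj : ∀ p ∈ proj, p.1.Nodup ∧ p.2.Nodup ∧
      PySem.Set.issubset p.1 R = true ∧ PySem.Set.issubset p.2 R = true) :
    ∀ l, (∀ p ∈ l, p ∈ proj) →
      isBCNFAGo proj R l = altInner proj (PySem.Set.ofList R) l := by
  intro l
  induction l with
  | nil => intro _; rfl
  | cons p l ih =>
    intro hl
    obtain ⟨hn1, hn2, hs1, hs2⟩ := hproj p (hl p List.mem_cons_self)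
    have ha : PySem.Set.ofList p.1 = p.1 := PySem.Set.ofList_eq_self_of_nodup p.1 hn1
    have hb : PySem.Set.ofList p.2 = p.2 := PySem.Set.ofList_eq_self_of_nodup p.2 hn2
    have hrec := ih (fun q hq => hl q (List.mem_cons_of_mem _ hq))
    simp only [isBCNFAGo, altInner, ha, hb, hs1, hs2, Bool.not_true, Bool.or_false,
      Bool.false_or, if_false]
    by_cases hba : PySem.Set.issubset p.2 p.1
    · simp only [hba, if_true, Bool.not_true, Bool.false_and, if_false]
      exact hrec
    · simp only [hba, if_false]
      have hsk : isSuperKeyA proj R p.1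
          = PySem.Set.equal (closureBRec proj p.1) (PySem.Set.ofList R) := by
        unfold isSuperKeyA
        exact superkey_eq proj p.1 (PySem.Set.ofList R)
      rcases he : PySem.Set.equal (closureBRec proj p.1) (PySem.Set.ofList R) with _ | _
      · simp only [hsk, he, Bool.not_false, if_true, Bool.and_true, if_true,
          Bool.not_eq_true', Bool.not_eq_false]
        simp [hba]
      · simp only [hsk, he, Bool.not_true, if_false, Bool.and_false, if_false]
        exact hrec

theorem go_eq (F : List (List String × List String)) (T : List (List String)) :
    isSchemaBCNFGo F T = isSchemaBCNFAltGo F T := by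
  induction T with
  | nil => rfl
  | cons R rest ih =>
    simp only [isSchemaBCNFGo, isSchemaBCNFAltGo]
    rw [proj_eq]
    set proj := (F.filter (fun p =>
        PySem.Set.issubset (PySem.Set.ofList p.1) (PySem.Set.ofList R) &&
        PySem.Set.issubset (PySem.Set.ofList p.2) (PySem.Set.ofList R))).map (fun p =>
          (PySem.Set.ofList p.1, PySem.Set.ofList p.2)) with hproj_def
    have hmem : ∀ x : String, x ∈ R ↔ x ∈ PySem.Set.ofList R :=
    fun x => (PySem.Set.mem_ofList R x).symm
    have hproj : ∀ p ∈ proj, p.1.Nodup ∧ p.2.Nodup ∧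
        PySem.Set.issubset p.1 R = true ∧ PySem.Set.issubset p.2 R = true := by
      intro p hp
      rw [hproj_def] at hp
      obtain ⟨q, hq, rfl⟩ := List.mem_map.mp hp
      have hqf := (List.mem_filter.mp hq).2
      rw [Bool.and_eq_true] at hqf
      exact ⟨PySem.Set.nodup_ofList _, PySem.Set.nodup_ofList _,
        by rw [issubset_eq_of_mem_iff _ _ _ hmem]; exact hqf.1,
        by rw [issubset_eq_of_mem_iff _ _ _ hmem]; exact hqf.2⟩
    have hbcnf : isBCNFA proj R = altInner proj (PySem.Set.ofList R) proj := by
      unfold isBCNFA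
      exact inner_eq proj R hproj proj (fun q hq => hq)
    rw [hbcnf]
    rcases hx : altInner proj (PySem.Set.ofList R) proj with _ | _
    · simp [hx]
    · simp [hx, ih]

-- ===== VERDICT (by name: the statement is the Claim_ definition above) =====
theorem isSchemaBCNF_spec : Claim_equal_isSchemaBCNF := by
  intro F T _
  unfold Spec_isSchemaBCNF isSchemaBCNF isSchemaBCNF_alt
  exact go_eq F T
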